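-- pv_equiv track=rewrite | github.com/LNZ001/Analysis-of-algorithm-exercises | leetcode_ex/ex贪吃的小q.py | compute
-- ===== SOURCE A (Python) =====
-- def compute(n, k):
--     '''
--     第一天吃k块, 至少需要多少块.
--     :param k:
--     :return:
--     '''
--     pos = 1
--     cur = k
--     count = k
--     while pos < n:
--         if k % 2 ==0:
--             cur = cur//2
--         else:
--             cur = cur//2 + 1
--         count += cur
--         pos += 1
--     return count
-- ===== SOURCE B (Python) =====
-- def compute(n, k):
--     # Jump to the answer once the per-day amount hits a fixed point: O(log|k|) instead of O(n).
--     count = k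
--     cur = k
--     if k % 2 == 0:
--         step = lambda c: c // 2
--     else:
--         step = lambda c: c // 2 + 1
--     days = n - 1
--     while days > 0:
--         nxt = step(cur)
--         if nxt == cur:
--             count += cur * days
--             return count
--         cur = nxt
--         count += cur
--         days -= 1
--     return count
-- ===== Notes on version B (the rewrite author's own statement) =====
-- stated objective: faster
-- what changed: Instead of looping over all n-1 days, B iterates the halving step only until the per-day amount reaches its fixed point (at most ~log|k| steps) and then adds fixed_amount * remaining_days in one multiplication.
import Mathlib
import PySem

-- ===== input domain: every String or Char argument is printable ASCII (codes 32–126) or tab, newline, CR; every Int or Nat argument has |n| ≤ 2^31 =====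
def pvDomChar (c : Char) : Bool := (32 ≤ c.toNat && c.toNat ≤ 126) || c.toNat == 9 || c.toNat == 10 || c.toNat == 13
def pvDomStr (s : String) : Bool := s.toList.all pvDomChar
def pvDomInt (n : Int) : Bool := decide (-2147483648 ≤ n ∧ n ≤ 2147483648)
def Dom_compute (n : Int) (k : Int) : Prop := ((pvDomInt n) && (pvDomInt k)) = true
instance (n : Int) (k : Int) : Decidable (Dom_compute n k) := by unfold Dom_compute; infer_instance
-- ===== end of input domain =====

-- B replaces A's O(n) day-by-day loop by iterating only until the per-day amount
-- reaches its fixed point, then adding (fixed amount) * (remaining days).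

-- ===== PORT A =====
-- A's while loop: pos, cur, count; each day halves cur (rounding per parity of k!).
def computeLoopA (k : Int) (n : Int) (pos cur count : Int) : Int :=
  if _h : pos < n then
    let cur' := if PySem.Int.mod k 2 = 0 then PySem.Int.floordiv cur 2
                else PySem.Int.floordiv cur 2 + 1
    computeLoopA k n (pos + 1) cur' (count + cur')
  else count
termination_by (n - pos).toNat
decreasing_by omega

def compute (n : Int) (k : Int) : Int :=
  computeLoopA k n 1 k k

-- ===== PORT B =====
-- the step function chosen once from k's parity (B's lambda)
def computeStepB (k : Int) (c : Int) : Int :=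
  if PySem.Int.mod k 2 = 0 then PySem.Int.floordiv c 2 else PySem.Int.floordiv c 2 + 1

def computeLoopB (k : Int) (days cur count : Int) : Int :=
  if _h : 0 < days then
    let nxt := computeStepB k cur
    if nxt = cur then count + cur * days
    else computeLoopB k (days - 1) nxt (count + nxt)
  else count
termination_by days.toNat
decreasing_by omega

def compute_alt (n : Int) (k : Int) : Int :=
  computeLoopB k (n - 1) k k

-- ===== PRECONDITION & SPEC =====
def Spec_compute (n : Int) (k : Int) (out : Int) : Prop := out = compute_alt n k
instance (n : Int) (k : Int) (out : Int) : Decidable (Spec_compute n k out) := by unfold Spec_compute; infer_instance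

-- ===== CLAIM (what is proved, stated in full; the proofs are below) =====
def Claim_equal_compute : Prop := ∀ (n : Int) (k : Int), Dom_compute n k → Spec_compute n k (compute n k)

-- ===== LEMMAS AND PROOFS =====

-- once cur is a fixed point of the step, A's loop adds cur each remaining day
theorem loopA_fixed (k n : Int) (pos cur count : Int)
    (hf : computeStepB k cur = cur) (hle : pos ≤ n) :
    computeLoopA k n pos cur count = count + cur * (n - pos) := by
  by_cases h : pos < n
  · rw [computeLoopA]
    simp only [h, dif_pos]
    have hstep : (if PySem.Int.mod k 2 = 0 then PySem.Int.floordiv cur 2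
        else PySem.Int.floordiv cur 2 + 1) = cur := hf
    rw [hstep]
    rw [loopA_fixed k n (pos + 1) cur (count + cur) hf (by omega)]
    ring
  · have : pos = n := le_antisymm hle (not_lt.mp h)
    rw [computeLoopA]
    simp [h, this]
termination_by (n - pos).toNat
decreasing_by omega

theorem loopA_eq_loopB (k n : Int) (pos cur count : Int) :
    computeLoopA k n pos cur count = computeLoopB k (n - pos) cur count := by
  by_cases h : pos < n
  · rw [computeLoopA, computeLoopB]
    have hd : 0 < n - pos := by omega
    simp only [h, dif_pos, hd]
    set nxt := computeStepB k cur with hnxt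
    have hstep : (if PySem.Int.mod k 2 = 0 then PySem.Int.floordiv cur 2
        else PySem.Int.floordiv cur 2 + 1) = nxt := rfl
    rw [hstep]
    by_cases hfix : nxt = cur
    · rw [if_pos hfix, hfix, loopA_fixed k n (pos + 1) cur (count + cur)
        (hnxt.symm.trans hfix) (by omega)]
      ring
    · simp only [if_neg hfix]
      rw [loopA_eq_loopB k n (pos + 1) nxt (count + nxt)]
      congr 1
      omega
  · rw [computeLoopA, computeLoopB]
    have hd : ¬ 0 < n - pos := by omega
    simp [h]
termination_by (n - pos).toNat
decreasing_by omega

-- ===== VERDICT (by name: the statement is the Claim_ definition above) =====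
theorem compute_spec : Claim_equal_compute := by
  intro n k _
  unfold Spec_compute compute compute_alt
  rw [loopA_eq_loopB]
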